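-- pv_equiv track=rewrite | github.com/jarek-bir/XSS-VibesV2 | xss_vibes/payload_mutation.py | _apply_whitespace_insertion
-- ===== SOURCE A (Python) =====
-- def _apply_whitespace_insertion(payload: str) -> str:
--     """Aplikuje wstawianie białych znaków."""
--     whitespace_chars = [" ", "\t", "\n", "\r", "\f"]
--
--     # Wstaw białe znaki w różnych miejscach
--     mutations = [
--         lambda p: p.replace("<script>", "< script >"),
--         lambda p: p.replace("onerror=", "onerror ="),
--         lambda p: p.replace("alert(", "alert ("),
--         lambda p: p.replace("src=", "src ="),
--     ]
--
--     for mutation in mutations: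
--         payload = mutation(payload)
--
--     return payload
-- ===== SOURCE B (Python) =====
-- def _apply_whitespace_insertion(payload: str) -> str:
--     """Single left-to-right pass: at each position emit the spaced form of the
--     first matching pattern (they never overlap), else copy the character."""
--     rules = [
--         ("<script>", "< script >"),
--         ("onerror=", "onerror ="),
--         ("alert(", "alert ("),
--         ("src=", "src ="),
--     ]
--     out = []
--     i = 0
--     n = len(payload)
--     while i < n:
--         for old, new in rules:
--             if payload.startswith(old, i):
--                 out.append(new)
--                 i += len(old)
--                 break
--         else:
--             out.append(payload[i])
--             i += 1
--     return "".join(out)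
-- ===== Notes on version B (the rewrite author's own statement) =====
-- stated objective: alternative
-- what changed: B makes a single left-to-right pass over the payload, emitting the spaced form of the first of the four patterns that matches at each position, instead of A's four sequential full str.replace scans; the patterns are pairwise non-overlapping and no replacement creates a new match, so the result is identical.
import Mathlib
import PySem

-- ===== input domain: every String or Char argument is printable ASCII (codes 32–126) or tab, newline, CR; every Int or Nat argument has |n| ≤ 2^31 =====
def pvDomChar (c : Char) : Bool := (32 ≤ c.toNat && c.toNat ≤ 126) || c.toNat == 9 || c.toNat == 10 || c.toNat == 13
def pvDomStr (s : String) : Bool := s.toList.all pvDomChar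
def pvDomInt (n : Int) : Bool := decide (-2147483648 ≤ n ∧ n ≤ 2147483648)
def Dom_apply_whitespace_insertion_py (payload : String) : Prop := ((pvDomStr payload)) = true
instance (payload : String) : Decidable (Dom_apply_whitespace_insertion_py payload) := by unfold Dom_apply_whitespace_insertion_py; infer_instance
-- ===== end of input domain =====

-- B replaces A's four sequential str.replace scans by one left-to-right pass that emits the
-- spaced form of the first pattern matching at each position (objective: alternative
-- single-pass algorithm; proved to return A's exact value on every input).

-- ===== PORT A =====
-- A applies the four str.replace mutations in order.
def apply_whitespace_insertion_py (payload : String) : String :=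
  let s1 := PySem.Str.replace payload "<script>" "< script >"
  let s2 := PySem.Str.replace s1 "onerror=" "onerror ="
  let s3 := PySem.Str.replace s2 "alert(" "alert ("
  PySem.Str.replace s3 "src=" "src ="

-- ===== PORT B =====
-- the (old, new) rule table of Source B, as char lists ("<script>".toList etc.)
def pvRules : List (List Char × List Char) :=
  [ (['<','s','c','r','i','p','t','>'], ['<',' ','s','c','r','i','p','t',' ','>']),
    (['o','n','e','r','r','o','r','='], ['o','n','e','r','r','o','r',' ','=']),
    (['a','l','e','r','t','('],         ['a','l','e','r','t',' ','(']),
    (['s','r','c','='],                 ['s','r','c',' ','=']) ]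

-- Source B's inner for/else: the first rule whose old matches at the current position
def pvFindRule (l : List Char) : List (List Char × List Char) → Option (List Char × List Char)
  | [] => none
  | r :: rest => if r.1.isPrefixOf l then some r else pvFindRule l rest

-- Source B's while loop: l is the unread suffix payload[i:], out is the list of emitted pieces.
-- (i += len(old) is rendered as dropping len(old)-1 of the tail — the same suffix for the
-- nonempty patterns of pvRules; this phrasing makes the recursion structurally decreasing.)
def pvSpGo : List Char → List (List Char) → List (List Char)
  | [], out => out
  | c :: t, out =>
    match pvFindRule (c :: t) pvRules with
    | some r => pvSpGo (t.drop (r.1.length - 1)) (out ++ [r.2])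
    | none => pvSpGo t (out ++ [[c]])
termination_by l _ => l.length
decreasing_by all_goals (simp; try omega)

def apply_whitespace_insertion_py_alt (payload : String) : String :=
  String.ofList (PySem.Chars.join [] (pvSpGo payload.toList []))

-- ===== PRECONDITION & SPEC =====
def Spec_apply_whitespace_insertion_py (payload : String) (out : String) : Prop := out = apply_whitespace_insertion_py_alt payload
instance (payload : String) (out : String) : Decidable (Spec_apply_whitespace_insertion_py payload out) := by unfold Spec_apply_whitespace_insertion_py; infer_instance

-- ===== CLAIM (what is proved, stated in full; the proofs are below) =====
def Claim_equal_apply_whitespace_insertion_py : Prop := ∀ (payload : String), Dom_apply_whitespace_insertion_py payload → Spec_apply_whitespace_insertion_py payload (apply_whitespace_insertion_py payload)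

-- ===== LEMMAS AND PROOFS =====

-- the four patterns and their spaced forms, named for the proofs
def pvP1 : List Char := ['<','s','c','r','i','p','t','>']
def pvW1 : List Char := ['<',' ','s','c','r','i','p','t',' ','>']
def pvP2 : List Char := ['o','n','e','r','r','o','r','=']
def pvW2 : List Char := ['o','n','e','r','r','o','r',' ','=']
def pvP3 : List Char := ['a','l','e','r','t','(']
def pvW3 : List Char := ['a','l','e','r','t',' ','(']
def pvP4 : List Char := ['s','r','c','=']
def pvW4 : List Char := ['s','r','c',' ','=']

-- fuel-free rendering of PySem.Chars.replace's scan for a nonempty pattern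
def pvRepl (p q : List Char) : List Char → List Char
  | [] => []
  | c :: t =>
    if p.isPrefixOf (c :: t) then q ++ pvRepl p q (t.drop (p.length - 1))
    else c :: pvRepl p q t
termination_by l => l.length
decreasing_by all_goals (simp; try omega)

-- fuel-free rendering of B's single pass (pvSpGo without the accumulator)
def pvSp : List Char → List Char
  | [] => []
  | c :: t =>
    match pvFindRule (c :: t) pvRules with
    | some r => r.2 ++ pvSp (t.drop (r.1.length - 1))
    | none => c :: pvSp t
termination_by l => l.length
decreasing_by all_goals (simp; try omega)

theorem pvReplMatch (p q r : List Char) (hp : p ≠ []) :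
    pvRepl p q (p ++ r) = q ++ pvRepl p q r := by
  obtain ⟨c, p', rfl⟩ := List.exists_cons_of_ne_nil hp
  rw [List.cons_append, pvRepl]
  have hpre : (c :: p').isPrefixOf (c :: (p' ++ r)) = true :=
    List.isPrefixOf_iff_prefix.mpr ⟨r, by simp⟩
  rw [if_pos hpre]
  simp

theorem pvReplNoMatch (p q : List Char) (c : Char) (t : List Char) (h : ¬ p <+: c :: t) :
    pvRepl p q (c :: t) = c :: pvRepl p q t := by
  rw [pvRepl, if_neg (by simpa [List.isPrefixOf_iff_prefix] using h)]

theorem pvGo_eq_pvRepl (old new : List Char) (hold : old ≠ []) :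
    ∀ fuel l acc, l.length ≤ fuel →
      PySem.Chars.replace.go old new fuel l acc = acc.reverse ++ pvRepl old new l := by
  intro fuel
  induction fuel with
  | zero =>
    intro l acc hl
    have hnil : l = [] := List.eq_nil_of_length_eq_zero (Nat.le_zero.mp hl)
    subst hnil
    simp [PySem.Chars.replace.go, pvRepl]
  | succ n ih =>
    intro l acc hl
    cases l with
    | nil => simp [PySem.Chars.replace.go, pvRepl]
    | cons c t =>
      rw [PySem.Chars.replace.go]
      by_cases hpre : old.isPrefixOf (c :: t) = true
      · rw [if_pos hpre]
        have hdrop : (c :: t).drop old.length = t.drop (old.length - 1) := by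
          obtain ⟨d, old', rfl⟩ := List.exists_cons_of_ne_nil hold
          simp
        rw [hdrop, ih _ _ (by simp at hl ⊢; omega)]
        rw [pvRepl, if_pos hpre]
        simp
      · rw [if_neg hpre, ih _ _ (by simp at hl ⊢; omega)]
        rw [pvRepl, if_neg hpre]
        simp

theorem pvStrReplace_eq (s : String) (old new : String) (hold : old.toList ≠ []) :
    PySem.Str.replace s old new = String.ofList (pvRepl old.toList new.toList s.toList) := by
  rw [PySem.Str.replace, PySem.Chars.replace]
  rw [if_neg (by simpa [List.isEmpty_iff] using hold)]
  rw [pvGo_eq_pvRepl _ _ hold _ _ _ le_rfl]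
  simp

theorem pvJoinNil_flatten (parts : List (List Char)) :
    PySem.Chars.join [] parts = parts.flatten := by
  induction parts with
  | nil => simp [PySem.Chars.join_nil]
  | cons a rest ih =>
    cases rest with
    | nil => simp [PySem.Chars.join_singleton]
    | cons b r => simp [PySem.Chars.join_cons_cons, ih]

theorem pvSpGo_flatten : ∀ n l, l.length ≤ n → ∀ out : List (List Char),
    (pvSpGo l out).flatten = out.flatten ++ pvSp l := by
  intro n
  induction n with
  | zero =>
    intro l hl out
    have hnil : l = [] := List.eq_nil_of_length_eq_zero (Nat.le_zero.mp hl)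
    subst hnil
    simp [pvSpGo, pvSp]
  | succ n ih =>
    intro l hl out
    cases l with
    | nil => simp [pvSpGo, pvSp]
    | cons c t =>
      simp only [pvSpGo, pvSp]
      cases hfr : pvFindRule (c :: t) pvRules with
      | none =>
        rw [ih t (by simp at hl; omega)]
        simp
      | some r =>
        rw [ih (t.drop (r.1.length - 1)) (by simp at hl ⊢; omega)]
        simp

-- ¬ s <+: p and ¬ p <+: s make p unable to match at the start of s ++ X for any X
theorem pvNotPrefixAppend (p s X : List Char) (h1 : ¬ s <+: p) (h2 : ¬ p <+: s) :
    ¬ p <+: s ++ X := by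
  intro h
  rcases List.prefix_or_prefix_of_prefix h (List.prefix_append s X) with h' | h'
  · exact h2 h'
  · exact h1 h'

theorem pvPrefixOfAppendLeft (s a b : List Char) (h : s <+: a ++ b) (hlen : s.length ≤ a.length) :
    s <+: a := by
  have hs : s = (a ++ b).take s.length := List.prefix_iff_eq_take.mp h
  rw [hs, List.take_append_of_le_length hlen]
  exact List.take_prefix _ _

-- the scan for p walks unchanged over a block w none of whose positions can start a p-match
theorem pvReplAppend (p q : List Char) : ∀ w X, (∀ k, k < w.length → ¬ p <+: (w.drop k ++ X)) →
    pvRepl p q (w ++ X) = w ++ pvRepl p q X := by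
  intro w
  induction w with
  | nil => intro X _; simp
  | cons c w' ih =>
    intro X h
    have h0 : ¬ p <+: c :: (w' ++ X) := by simpa using h 0 (by simp)
    rw [List.cons_append, pvReplNoMatch p q c (w' ++ X) h0]
    rw [ih X (fun k hk => by simpa using h (k + 1) (by simp; omega))]
    simp

-- push pvRepl p through a block w of whose suffixes none is comparable with p
theorem pvPushW (p q w : List Char)
    (hinc : ∀ k, k < w.length → ¬ (w.drop k <+: p) ∧ ¬ (p <+: w.drop k)) (X : List Char) :
    pvRepl p q (w ++ X) = w ++ pvRepl p q X :=
  pvReplAppend p q w X fun k hk =>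
    pvNotPrefixAppend p (w.drop k) X (hinc k hk).1 (hinc k hk).2

-- replacing p by q cannot create a new occurrence of pat (no suffix of pat matches into q)
theorem pvNoCreate (p q pat : List Char) (hlen : pat.length ≤ q.length)
    (hq : ∀ m, m < pat.length → ¬ pat.drop m <+: q) :
    ∀ n X, X.length ≤ n → ∀ m, m < pat.length →
      pat.drop m <+: pvRepl p q X → pat.drop m <+: X := by
  intro n
  induction n with
  | zero =>
    intro X hX m hm hpre
    have hnil : X = [] := List.eq_nil_of_length_eq_zero (Nat.le_zero.mp hX)
    subst hnil
    rw [show pvRepl p q [] = [] from by rw [pvRepl]] at hpre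
    have h0 : pat.drop m = [] := List.prefix_nil.mp hpre
    have := congrArg List.length h0
    simp at this
    omega
  | succ n ih =>
    intro X hX m hm hpre
    cases X with
    | nil =>
      rw [show pvRepl p q [] = [] from by rw [pvRepl]] at hpre
      have h0 : pat.drop m = [] := List.prefix_nil.mp hpre
      have := congrArg List.length h0
      simp at this
      omega
    | cons c t =>
      by_cases hp : p <+: c :: t
      · rw [pvRepl, if_pos (List.isPrefixOf_iff_prefix.mpr hp)] at hpre
        have hsub : pat.drop m <+: q :=
          pvPrefixOfAppendLeft _ _ _ hpre (by simp; omega)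
        exact absurd hsub (hq m hm)
      · rw [pvReplNoMatch p q c t hp] at hpre
        rw [List.drop_eq_getElem_cons hm] at hpre ⊢
        rw [List.cons_prefix_cons] at hpre ⊢
        obtain ⟨hc, htail⟩ := hpre
        refine ⟨hc, ?_⟩
        by_cases hm1 : m + 1 < pat.length
        · exact ih t (by simp at hX; omega) (m + 1) hm1 htail
        · have hend : pat.drop (m + 1) = [] := List.drop_eq_nil_of_le (by omega)
          rw [hend]
          exact List.nil_prefix
-- no occurrence of pat can appear at the head after replacing p by q in the tail
theorem pvConsNoCreate (p q pat : List Char) (hlen : pat.length ≤ q.length)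
    (hq : ∀ m, m < pat.length → ¬ pat.drop m <+: q)
    (c : Char) (t : List Char) (hno : ¬ pat <+: c :: t) :
    ¬ pat <+: c :: pvRepl p q t := by
  intro h
  cases pat with
  | nil => exact hno List.nil_prefix
  | cons a pat' =>
    rw [List.cons_prefix_cons] at h
    obtain ⟨ha, h'⟩ := h
    have h'' : pat' <+: t := by
      cases pat' with
      | nil => exact List.nil_prefix
      | cons b pb =>
        have := pvNoCreate p q (a :: b :: pb) hlen hq t.length t le_rfl 1 (by simp) (by simpa using h')
        simpa using this
    exact hno (List.cons_prefix_cons.mpr ⟨ha, h''⟩)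

-- one step of pvSp when a rule matches / when none matches
theorem pvSpMatch (c : Char) (t r old new : List Char)
    (hfr : pvFindRule (c :: t) pvRules = some (old, new)) (hol : old ≠ [])
    (heq : c :: t = old ++ r) :
    pvSp (c :: t) = new ++ pvSp r := by
  simp only [pvSp, hfr]
  congr 1
  obtain ⟨d, old', rfl⟩ := List.exists_cons_of_ne_nil hol
  rw [List.cons_append] at heq
  obtain ⟨rfl, rfl⟩ : c = d ∧ t = old' ++ r := by
    constructor <;> [exact (List.cons.injEq ..).mp heq |>.1; exact (List.cons.injEq ..).mp heq |>.2]
  congr 1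
  simp

theorem pvSpNoMatch (c : Char) (t : List Char)
    (hfr : pvFindRule (c :: t) pvRules = none) :
    pvSp (c :: t) = c :: pvSp t := by
  simp only [pvSp, hfr]

theorem pvMain : ∀ n l, l.length ≤ n →
    pvSp l = pvRepl pvP4 pvW4 (pvRepl pvP3 pvW3 (pvRepl pvP2 pvW2 (pvRepl pvP1 pvW1 l))) := by
  intro n
  induction n with
  | zero =>
    intro l hl
    have hnil : l = [] := List.eq_nil_of_length_eq_zero (Nat.le_zero.mp hl)
    subst hnil
    rw [pvSp, pvRepl, pvRepl, pvRepl, pvRepl]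
  | succ n ih =>
    intro l hl
    cases l with
    | nil => rw [pvSp, pvRepl, pvRepl, pvRepl, pvRepl]
    | cons c t =>
      by_cases h1 : pvP1 <+: c :: t
      · -- rule 1 matches at the head
        obtain ⟨r, hr⟩ := h1
        have hrlen : r.length ≤ n := by
          have := congrArg List.length hr
          simp [pvP1] at this
          simp at hl
          omega
        have hfr : pvFindRule (c :: t) pvRules = some (pvP1, pvW1) := by
          simp only [pvFindRule, pvRules]
          rw [if_pos (List.isPrefixOf_iff_prefix.mpr (hr ▸ List.prefix_append pvP1 r))]
          rfl
        rw [pvSpMatch c t r pvP1 pvW1 hfr (by simp [pvP1]) hr.symm, ← hr]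
        rw [pvReplMatch pvP1 pvW1 r (by simp [pvP1])]
        rw [pvPushW pvP2 pvW2 pvW1 (by decide)]
        rw [pvPushW pvP3 pvW3 pvW1 (by decide)]
        rw [pvPushW pvP4 pvW4 pvW1 (by decide)]
        rw [ih r hrlen]
      · by_cases h2 : pvP2 <+: c :: t
        · obtain ⟨r, hr⟩ := h2
          have hrlen : r.length ≤ n := by
            have := congrArg List.length hr
            simp [pvP2] at this
            simp at hl
            omega
          have hfr : pvFindRule (c :: t) pvRules = some (pvP2, pvW2) := by
            simp only [pvFindRule, pvRules]
            rw [if_neg (by rw [List.isPrefixOf_iff_prefix]; exact h1)]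
            rw [if_pos (List.isPrefixOf_iff_prefix.mpr (hr ▸ List.prefix_append pvP2 r))]
            rfl
          rw [pvSpMatch c t r pvP2 pvW2 hfr (by simp [pvP2]) hr.symm, ← hr]
          rw [pvPushW pvP1 pvW1 pvP2 (by decide)]
          rw [pvReplMatch pvP2 pvW2 _ (by simp [pvP2])]
          rw [pvPushW pvP3 pvW3 pvW2 (by decide)]
          rw [pvPushW pvP4 pvW4 pvW2 (by decide)]
          rw [ih r hrlen]
        · by_cases h3 : pvP3 <+: c :: t
          · obtain ⟨r, hr⟩ := h3
            have hrlen : r.length ≤ n := by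
              have := congrArg List.length hr
              simp [pvP3] at this
              simp at hl
              omega
            have hfr : pvFindRule (c :: t) pvRules = some (pvP3, pvW3) := by
              simp only [pvFindRule, pvRules]
              rw [if_neg (by rw [List.isPrefixOf_iff_prefix]; exact h1)]
              rw [if_neg (by rw [List.isPrefixOf_iff_prefix]; exact h2)]
              rw [if_pos (List.isPrefixOf_iff_prefix.mpr (hr ▸ List.prefix_append pvP3 r))]
              rfl
            rw [pvSpMatch c t r pvP3 pvW3 hfr (by simp [pvP3]) hr.symm, ← hr]
            rw [pvPushW pvP1 pvW1 pvP3 (by decide)]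
            rw [pvPushW pvP2 pvW2 pvP3 (by decide)]
            rw [pvReplMatch pvP3 pvW3 _ (by simp [pvP3])]
            rw [pvPushW pvP4 pvW4 pvW3 (by decide)]
            rw [ih r hrlen]
          · by_cases h4 : pvP4 <+: c :: t
            · obtain ⟨r, hr⟩ := h4
              have hrlen : r.length ≤ n := by
                have := congrArg List.length hr
                simp [pvP4] at this
                simp at hl
                omega
              have hfr : pvFindRule (c :: t) pvRules = some (pvP4, pvW4) := by
                simp only [pvFindRule, pvRules]
                rw [if_neg (by rw [List.isPrefixOf_iff_prefix]; exact h1)]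
                rw [if_neg (by rw [List.isPrefixOf_iff_prefix]; exact h2)]
                rw [if_neg (by rw [List.isPrefixOf_iff_prefix]; exact h3)]
                rw [if_pos (List.isPrefixOf_iff_prefix.mpr (hr ▸ List.prefix_append pvP4 r))]
                rfl
              rw [pvSpMatch c t r pvP4 pvW4 hfr (by simp [pvP4]) hr.symm, ← hr]
              rw [pvPushW pvP1 pvW1 pvP4 (by decide)]
              rw [pvPushW pvP2 pvW2 pvP4 (by decide)]
              rw [pvPushW pvP3 pvW3 pvP4 (by decide)]
              rw [pvReplMatch pvP4 pvW4 _ (by simp [pvP4])]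
              rw [ih r hrlen]
            · -- no rule matches at the head
              have hfr : pvFindRule (c :: t) pvRules = none := by
                simp only [pvFindRule, pvRules]
                rw [if_neg (by rw [List.isPrefixOf_iff_prefix]; exact h1)]
                rw [if_neg (by rw [List.isPrefixOf_iff_prefix]; exact h2)]
                rw [if_neg (by rw [List.isPrefixOf_iff_prefix]; exact h3)]
                rw [if_neg (by rw [List.isPrefixOf_iff_prefix]; exact h4)]
              rw [pvSpNoMatch c t hfr]
              rw [pvReplNoMatch pvP1 pvW1 c t h1]
              have hn2 : ¬ pvP2 <+: c :: pvRepl pvP1 pvW1 t :=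
                pvConsNoCreate pvP1 pvW1 pvP2 (by decide) (by decide) c t h2
              rw [pvReplNoMatch pvP2 pvW2 c _ hn2]
              have hn3a : ¬ pvP3 <+: c :: pvRepl pvP1 pvW1 t :=
                pvConsNoCreate pvP1 pvW1 pvP3 (by decide) (by decide) c t h3
              have hn3 : ¬ pvP3 <+: c :: pvRepl pvP2 pvW2 (pvRepl pvP1 pvW1 t) :=
                pvConsNoCreate pvP2 pvW2 pvP3 (by decide) (by decide) c _ hn3a
              rw [pvReplNoMatch pvP3 pvW3 c _ hn3]
              have hn4a : ¬ pvP4 <+: c :: pvRepl pvP1 pvW1 t :=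
                pvConsNoCreate pvP1 pvW1 pvP4 (by decide) (by decide) c t h4
              have hn4b : ¬ pvP4 <+: c :: pvRepl pvP2 pvW2 (pvRepl pvP1 pvW1 t) :=
                pvConsNoCreate pvP2 pvW2 pvP4 (by decide) (by decide) c _ hn4a
              have hn4 : ¬ pvP4 <+: c :: pvRepl pvP3 pvW3 (pvRepl pvP2 pvW2 (pvRepl pvP1 pvW1 t)) :=
                pvConsNoCreate pvP3 pvW3 pvP4 (by decide) (by decide) c _ hn4b
              rw [pvReplNoMatch pvP4 pvW4 c _ hn4]
              rw [ih t (by simp at hl; omega)]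

-- ===== VERDICT (by name: the statement is the Claim_ definition above) =====
theorem apply_whitespace_insertion_py_spec : Claim_equal_apply_whitespace_insertion_py := by
  intro payload _
  unfold Spec_apply_whitespace_insertion_py
  unfold apply_whitespace_insertion_py apply_whitespace_insertion_py_alt
  rw [pvStrReplace_eq _ _ _ (by decide), pvStrReplace_eq _ _ _ (by decide),
      pvStrReplace_eq _ _ _ (by decide), pvStrReplace_eq _ _ _ (by decide)]
  rw [pvJoinNil_flatten, pvSpGo_flatten payload.toList.length _ le_rfl]
  simp only [String.toList_ofList, List.flatten_nil, List.nil_append]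
  rw [pvMain payload.toList.length _ le_rfl]
  rfl
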